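-- pv_equiv track=rewrite | github.com/jjundev/project_woontech | harness/backend/worktree.py | _ls_args_allowed
-- ===== SOURCE A (Python) =====
-- def _ls_args_allowed(args: tuple[str, ...]) -> bool:
--     seen_option = False
--     for arg in args:
--         if not arg.startswith("-"):
--             continue
--         if arg not in {"-a", "-l", "-la", "-al"} or seen_option:
--             return False
--         seen_option = True
--     return True
-- ===== SOURCE B (Python) =====
-- def _ls_args_allowed(args: tuple[str, ...]) -> bool:
--     # Find the first option; it alone decides: it must be allowed and be the only option.
--     for i, a in enumerate(args):
--         if a.startswith("-"):
--             return a in {"-a", "-l", "-la", "-al"} and not any(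
--                 x.startswith("-") for x in args[i + 1:]
--             )
--     return True
-- ===== Notes on version B (the rewrite author's own statement) =====
-- stated objective: simpler
-- what changed: Replaces A's stateful flag loop (seen_option carried across the whole list with per-option early returns) by a first-option decomposition: locate the first '-'-argument, and decide immediately by one allowed-set membership test plus a no-further-options check on the remaining suffix; no flag state is maintained.
import Mathlib
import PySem

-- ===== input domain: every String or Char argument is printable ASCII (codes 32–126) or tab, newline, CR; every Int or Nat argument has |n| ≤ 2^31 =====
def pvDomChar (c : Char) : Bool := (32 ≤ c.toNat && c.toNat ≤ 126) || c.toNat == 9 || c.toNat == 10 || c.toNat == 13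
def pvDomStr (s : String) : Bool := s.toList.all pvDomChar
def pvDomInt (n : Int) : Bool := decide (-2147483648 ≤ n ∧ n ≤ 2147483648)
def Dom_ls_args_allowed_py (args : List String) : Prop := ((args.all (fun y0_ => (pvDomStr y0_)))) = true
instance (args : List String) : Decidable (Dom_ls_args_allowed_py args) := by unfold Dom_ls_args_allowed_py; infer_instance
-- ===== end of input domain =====

-- B replaces A's flag-carrying loop by structural recursion to the first option plus a separate no-further-options predicate; objective: simpler.
-- ===== PORT A =====
def lsAllowedOpts : List String := ["-a", "-l", "-la", "-al"]

def lsLoopA : List String → Bool → Bool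
  | [], _ => true
  | arg :: rest, seen_option =>
    if !(PySem.Str.startswith arg "-") then lsLoopA rest seen_option
    else if !(decide (arg ∈ lsAllowedOpts)) || seen_option then false
    else lsLoopA rest true

def ls_args_allowed_py (args : List String) : Bool := lsLoopA args false

-- ===== PORT B =====
def lsNoOptions (rest : List String) : Bool :=
  !(rest.any (fun x => PySem.Str.startswith x "-"))

def ls_args_allowed_py_alt : List String → Bool
  | [] => true
  | head :: tail =>
    if !(PySem.Str.startswith head "-") then ls_args_allowed_py_alt tail
    else decide (head ∈ lsAllowedOpts) && lsNoOptions tail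

-- ===== PRECONDITION & SPEC =====
def Spec_ls_args_allowed_py (args : List String) (out : Bool) : Prop := out = ls_args_allowed_py_alt args
instance (args : List String) (out : Bool) : Decidable (Spec_ls_args_allowed_py args out) := by unfold Spec_ls_args_allowed_py; infer_instance

-- ===== CLAIM (what is proved, stated in full; the proofs are below) =====
def Claim_equal_ls_args_allowed_py : Prop := ∀ (args : List String), Dom_ls_args_allowed_py args → Spec_ls_args_allowed_py args (ls_args_allowed_py args)

-- ===== LEMMAS AND PROOFS =====
lemma lsLoopA_true (args : List String) : lsLoopA args true = lsNoOptions args := by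
  induction args with
  | nil => simp [lsLoopA, lsNoOptions]
  | cons a rest ih =>
    by_cases h : PySem.Chars.startswith a.toList ['-'] = true <;>
      simp_all [lsLoopA, lsNoOptions, PySem.Str.startswith_eq, h]

lemma lsLoopA_false (args : List String) : lsLoopA args false = ls_args_allowed_py_alt args := by
  induction args with
  | nil => rfl
  | cons a rest ih =>
    by_cases h : PySem.Chars.startswith a.toList ['-'] = true
    · by_cases ha : a ∈ lsAllowedOpts <;>
        simp [lsLoopA, ls_args_allowed_py_alt, PySem.Str.startswith_eq, h, ha, lsLoopA_true]
    · simp [lsLoopA, ls_args_allowed_py_alt, PySem.Str.startswith_eq, h, ih]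

-- ===== VERDICT (by name: the statement is the Claim_ definition above) =====
theorem ls_args_allowed_py_spec : Claim_equal_ls_args_allowed_py := by
  intro args _
  unfold Spec_ls_args_allowed_py ls_args_allowed_py
  exact lsLoopA_false args
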